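-- pv_equiv track=rewrite | github.com/dp-IED/psychohistory | ingest/acled_raw.py | _expand_acled_csv_country_allow
-- ===== SOURCE A (Python) =====
-- from typing import IO, Any, Literal, Sequence
--
-- def _expand_acled_csv_country_allow(user: Sequence[str]) -> set[str]:
--     """
--     ACLED CSV `country` strings vary by export (e.g. ``Libya`` vs ``Libyan Arab Jamahiriya``).
--     If the user names any spelling in a group, accept all spellings in that group.
--     """
--     groups: tuple[frozenset[str], ...] = (
--         frozenset({"Libya", "Libyan Arab Jamahiriya"}),
--         frozenset({"Syria", "Syrian Arab Republic"}),
--     )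
--     out: set[str] = set()
--     for c in user:
--         s = (c or "").strip()
--         if not s:
--             continue
--         out.add(s)
--         for g in groups:
--             if s in g:
--                 out |= set(g)
--                 break
--     return out
-- ===== SOURCE B (Python) =====
-- from typing import Sequence
--
-- def _expand_acled_csv_country_allow(user: Sequence[str]) -> set[str]:
--     groups = (("Libya", "Libyan Arab Jamahiriya"), ("Syria", "Syrian Arab Republic"))
--     expanded = [s for c in user if (s := (c or "").strip())]
--     # staged passes: one rewrite of the whole list per synonym group
--     for g in groups:
--         expanded = [x for s in expanded for x in ((s, *g) if s in g else (s,))]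
--     return set(expanded)
-- ===== Notes on version B (the rewrite author's own statement) =====
-- stated objective: alternative
-- what changed: A maintains a result set incrementally, scanning the group tuple (with break) for every input element; B inverts the loop nesting: it first builds the cleaned name list in one pass, then for each synonym group performs a whole-list rewrite pass expanding that group's members, and deduplicates once with a single set() at the end.
import Mathlib
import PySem

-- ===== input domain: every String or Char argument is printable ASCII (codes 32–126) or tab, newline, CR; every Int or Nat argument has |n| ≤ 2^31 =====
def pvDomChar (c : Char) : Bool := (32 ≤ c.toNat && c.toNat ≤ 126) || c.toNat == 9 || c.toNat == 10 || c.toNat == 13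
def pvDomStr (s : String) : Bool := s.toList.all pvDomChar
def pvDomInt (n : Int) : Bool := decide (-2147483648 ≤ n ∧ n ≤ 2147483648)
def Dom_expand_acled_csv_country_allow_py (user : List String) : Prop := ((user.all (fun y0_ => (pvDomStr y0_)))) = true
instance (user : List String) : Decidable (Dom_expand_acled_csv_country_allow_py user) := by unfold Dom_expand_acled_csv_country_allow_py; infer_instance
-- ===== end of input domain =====

-- B inverts A's loop nesting: cleaned-name pass, then one whole-list rewrite pass per synonym
-- group, then a single final dedup; return value only (a Python set, order-insensitive).

-- ===== PORT A =====
-- the groups tuple, each frozenset's elements written in source order (the result is a set)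
def pvGroups : List (List String) :=
  [["Libya", "Libyan Arab Jamahiriya"], ["Syria", "Syrian Arab Republic"]]

-- the inner 'for g in groups: if s in g: out |= set(g); break' loop
def pvAInner (s : String) (out : PySem.Set String) : List (List String) → PySem.Set String
  | [] => out
  | g :: gs =>
    if PySem.Set.contains (PySem.Set.ofList g) s then
      PySem.Set.union out (PySem.Set.ofList g)
    else pvAInner s out gs

-- one iteration of A's 'for c in user' loop
def pvAStep (out : PySem.Set String) (c : String) : PySem.Set String :=
  let s := PySem.Str.strip (if c == "" then "" else c)
  if s == "" then out else pvAInner s (PySem.Set.add out s) pvGroups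

def expand_acled_csv_country_allow_py (user : List String) : List String :=
  user.foldl pvAStep []

-- ===== PORT B =====
-- groups as Source B's tuples
def pvGroupsB : List (List String) :=
  [["Libya", "Libyan Arab Jamahiriya"], ["Syria", "Syrian Arab Republic"]]

-- the cleaned-names comprehension '[s for c in user if (s := (c or "").strip())]'
def pvNameStep (acc : List String) (c : String) : List String :=
  let s := PySem.Str.strip (if c == "" then "" else c)
  if s == "" then acc else acc ++ [s]

-- one rewrite pass: '[x for s in expanded for x in ((s, *g) if s in g else (s,))]'
def pvStage (xs : List String) (g : List String) : List String :=
  xs.foldl (fun acc s => acc ++ (if g.contains s then s :: g else [s])) []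

def expand_acled_csv_country_allow_py_alt (user : List String) : List String :=
  PySem.Set.ofList (pvGroupsB.foldl pvStage (user.foldl pvNameStep []))

-- ===== PRECONDITION & SPEC =====
def Spec_expand_acled_csv_country_allow_py (user : List String) (out : List String) : Prop := out = expand_acled_csv_country_allow_py_alt user
instance (user : List String) (out : List String) : Decidable (Spec_expand_acled_csv_country_allow_py user out) := by unfold Spec_expand_acled_csv_country_allow_py; infer_instance

-- ===== CLAIM (what is proved, stated in full; the proofs are below) =====
def Claim_equal_expand_acled_csv_country_allow_py : Prop := ∀ (user : List String), Dom_expand_acled_csv_country_allow_py user → Spec_expand_acled_csv_country_allow_py user (expand_acled_csv_country_allow_py user)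

-- ===== LEMMAS AND PROOFS =====

-- the per-name expansion A performs (name, then its group's members in source order, first match)
def pvExpand1 (s : String) : List String :=
  if s = "Libya" ∨ s = "Libyan Arab Jamahiriya" then [s, "Libya", "Libyan Arab Jamahiriya"]
  else if s = "Syria" ∨ s = "Syrian Arab Republic" then [s, "Syria", "Syrian Arab Republic"]
  else [s]

theorem pvAInner_eq_update (s : String) (out : PySem.Set String) :
    pvAInner s (PySem.Set.add out s) pvGroups = PySem.Set.update out (pvExpand1 s) := by
  unfold pvExpand1 pvAInner pvGroups
  by_cases hL : s = "Libya" ∨ s = "Libyan Arab Jamahiriya"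
  · simp [hL, PySem.Set.union, PySem.Set.update,
      show PySem.Set.ofList ["Libya", "Libyan Arab Jamahiriya"] = ["Libya", "Libyan Arab Jamahiriya"] from by decide,
      List.foldl]
  · by_cases hS : s = "Syria" ∨ s = "Syrian Arab Republic"
    · simp [pvAInner, hL, hS, PySem.Set.union, PySem.Set.update,
        show PySem.Set.ofList ["Syria", "Syrian Arab Republic"] = ["Syria", "Syrian Arab Republic"] from by decide,
        List.foldl]
    · simp [pvAInner, hL, hS, PySem.Set.update, List.foldl]

-- hoisting the accumulator of the cleaned-names fold
theorem pvNames_acc (xs : List String) (acc : List String) :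
    xs.foldl pvNameStep acc = acc ++ xs.foldl pvNameStep [] := by
  induction xs generalizing acc with
  | nil => simp
  | cons x t iht =>
    simp only [List.foldl_cons, pvNameStep]
    cases hx : PySem.Str.strip (if x == "" then "" else x) == "" with
    | true => simpa [hx] using iht acc
    | false =>
      simp only [Bool.false_eq_true, if_false]
      rw [iht (acc ++ _), iht ([] ++ _)]
      simp

-- A's fold computes the first-occurrence dedup of the per-name-expanded cleaned-name stream
theorem pv_A_eq_ofList_flatMap (user : List String) (e : List String) :
    user.foldl pvAStep (PySem.Set.ofList e)
    = PySem.Set.ofList (e ++ (user.foldl pvNameStep []).flatMap pvExpand1) := by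
  induction user generalizing e with
  | nil => simp
  | cons c rest ih =>
    simp only [List.foldl_cons]
    cases h : PySem.Str.strip (if c == "" then "" else c) == "" with
    | true =>
      simp only [pvAStep, pvNameStep, h, if_true]
      exact ih e
    | false =>
      simp only [pvAStep, pvNameStep, h, Bool.false_eq_true, if_false]
      rw [pvAInner_eq_update, ← PySem.Set.ofList_append, ih]
      conv_rhs => rw [pvNames_acc rest]
      simp [List.append_assoc]

-- one rewrite pass is a flatMap over the list
theorem pvStage_eq_flatMap (xs g : List String) :
    pvStage xs g = xs.flatMap (fun s => if g.contains s then s :: g else [s]) := by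
  unfold pvStage
  simpa using PySem.List.foldl_append_eq_flatMap
    (g := fun s => if g.contains s then s :: g else [s]) (l := xs) (acc := [])

-- the two staged passes compose to A's per-name expansion (the groups are disjoint)
theorem pv_stages_eq (names : List String) :
    pvGroupsB.foldl pvStage names = names.flatMap pvExpand1 := by
  show pvStage (pvStage names _) _ = _
  rw [pvStage_eq_flatMap, pvStage_eq_flatMap, List.flatMap_assoc]
  apply List.flatMap_congr
  intro s _
  unfold pvExpand1
  by_cases hL : s = "Libya" ∨ s = "Libyan Arab Jamahiriya"
  · rcases hL with rfl | rfl <;> decide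
  · by_cases hS : s = "Syria" ∨ s = "Syrian Arab Republic"
    · rcases hS with rfl | rfl <;> decide
    · simp [hL, hS]

-- ===== VERDICT (by name: the statement is the Claim_ definition above) =====
theorem expand_acled_csv_country_allow_py_spec : Claim_equal_expand_acled_csv_country_allow_py := by
  intro user _
  show expand_acled_csv_country_allow_py user = expand_acled_csv_country_allow_py_alt user
  unfold expand_acled_csv_country_allow_py expand_acled_csv_country_allow_py_alt
  rw [pv_stages_eq]
  simpa using pv_A_eq_ofList_flatMap user []
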